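-- pv_equiv track=rewrite | github.com/lukwick/advent_of_code_2022 | day1.py | calories_counter1
-- ===== SOURCE A (Python) =====
-- def calories_counter1(data_list):
--
--     # Create counter variables
--     calories_temp = 0
--     calories_leader = 0
--
--     # Loop through calories list
--     for calories in data_list:
--
--         # Add calories to temp variable
--         calories_temp += calories
--
--         # If no calories are found, stop counting
--         if calories == 0:
--
--             # Check if temp calories are greater than current calories leader
--             if calories_temp > calories_leader:
--
--                 # If so, replace leader
--                 calories_leader = calories_temp
--
--             # Reset calories temp variable
--             calories_temp = 0
--
--     # After loop, check if the last calories group is relevant.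
--     if calories_temp > calories_leader:
--         calories_leader = calories_temp
--
--     # Return result
--     return calories_leader
-- ===== SOURCE B (Python) =====
-- def calories_counter1(data_list):
--     # Build the zero-delimited groups, then take the max group sum floored at 0.
--     groups = []
--     current = []
--     for c in data_list:
--         if c == 0:
--             groups.append(current)
--             current = []
--         else:
--             current.append(c)
--     groups.append(current)
--     return max([sum(g) for g in groups] + [0])
-- ===== Notes on version B (the rewrite author's own statement) =====
-- stated objective: alternative
-- what changed: Replaces the streaming accumulator-and-compare pass with an explicit build-groups-then-reduce structure: split the list into zero-delimited groups, map each to its sum, and take max of the sums together with 0.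
import Mathlib
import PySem

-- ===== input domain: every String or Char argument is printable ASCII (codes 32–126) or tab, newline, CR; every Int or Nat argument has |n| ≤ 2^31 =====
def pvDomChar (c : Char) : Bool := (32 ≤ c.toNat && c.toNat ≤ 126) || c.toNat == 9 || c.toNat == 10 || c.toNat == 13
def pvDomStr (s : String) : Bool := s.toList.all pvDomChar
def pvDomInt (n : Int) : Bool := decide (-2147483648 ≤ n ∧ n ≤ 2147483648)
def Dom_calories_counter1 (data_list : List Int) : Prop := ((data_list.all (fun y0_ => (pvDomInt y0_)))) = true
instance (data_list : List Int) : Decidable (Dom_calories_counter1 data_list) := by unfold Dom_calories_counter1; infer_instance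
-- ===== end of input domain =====

-- B rebuilds the answer as split-into-zero-delimited-groups, map sum, max with 0 (alternative decomposition; same cost).


-- ===== PORT A =====
-- streaming pass: running group sum (temp) and running leader
def calories_counter1 (data_list : List Int) : Int :=
  let s := data_list.foldl
    (fun (st : Int × Int) calories =>
      let temp := st.1 + calories
      if calories == 0 then
        (0, if temp > st.2 then temp else st.2)
      else
        (temp, st.2))
    (0, 0)
  if s.1 > s.2 then s.1 else s.2

-- ===== PORT B =====
-- build zero-delimited groups, then max of the group sums together with 0
def calories_counter1_alt (data_list : List Int) : Int :=
  let st := data_list.foldl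
    (fun (st : List (List Int) × List Int) c =>
      if c == 0 then (st.1 ++ [st.2], ([] : List Int)) else (st.1, st.2 ++ [c]))
    ([], [])
  let groups := st.1 ++ [st.2]
  match PySem.List.max? (groups.map List.sum ++ [0]) (fun x => x) with
  | some m => m
  | none => 0

-- ===== PRECONDITION & SPEC =====
def Spec_calories_counter1 (data_list : List Int) (out : Int) : Prop := out = calories_counter1_alt data_list
instance (data_list : List Int) (out : Int) : Decidable (Spec_calories_counter1 data_list out) := by unfold Spec_calories_counter1; infer_instance

-- ===== CLAIM (what is proved, stated in full; the proofs are below) =====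
def Claim_equal_calories_counter1 : Prop := ∀ (data_list : List Int), Dom_calories_counter1 data_list → Spec_calories_counter1 data_list (calories_counter1 data_list)

-- ===== LEMMAS AND PROOFS =====

-- running max of the completed groups' sums, started at 0 (A's leader)
def pvM (gs : List (List Int)) : Int := (gs.map List.sum).foldl max 0

lemma pvfoldl_max_pull (t : List Int) (a b : Int) :
    t.foldl max (max a b) = max a (t.foldl max b) := by
  induction t generalizing b with
  | nil => rfl
  | cons x t ih =>
      simp only [List.foldl_cons, max_assoc]
      exact ih (max b x)

lemma pvloop_eq (l : List Int) (gs : List (List Int)) (cur : List Int) :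
    l.foldl
      (fun (st : Int × Int) calories =>
        let temp := st.1 + calories
        if calories == 0 then
          (0, if temp > st.2 then temp else st.2)
        else
          (temp, st.2))
      (cur.sum, pvM gs)
    =
    (let p := l.foldl
        (fun (st : List (List Int) × List Int) c =>
          if c == 0 then (st.1 ++ [st.2], ([] : List Int)) else (st.1, st.2 ++ [c]))
        (gs, cur);
     (p.2.sum, pvM p.1)) := by
  induction l generalizing gs cur with
  | nil => rfl
  | cons c l ih =>
      simp only [List.foldl_cons]
      by_cases hc : c = 0
      · subst hc
        simp only [beq_self_eq_true, if_pos]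
        have h1 : pvM (gs ++ [cur]) = if cur.sum + 0 > pvM gs then cur.sum + 0 else pvM gs := by
          simp only [pvM, List.map_append, List.foldl_append, List.map_cons, List.map_nil,
            List.foldl_cons, List.foldl_nil, add_zero]
          rcases lt_trichotomy (pvM gs) cur.sum with h | h | h <;>
            simp [pvM] at h ⊢ <;> omega
        have := ih (gs ++ [cur]) []
        simp only [List.sum_nil] at this
        rw [← h1] at *
        simpa using this
      · have hb : (c == 0) = false := by simp [hc]
        simp only [hb, Bool.false_eq_true]
        have := ih gs (cur ++ [c])
        simpa [List.sum_append] using this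
  
-- ===== VERDICT (by name: the statement is the Claim_ definition above) =====
theorem calories_counter1_spec : Claim_equal_calories_counter1 := by
  intro data_list _
  unfold Spec_calories_counter1 calories_counter1 calories_counter1_alt
  have h := pvloop_eq data_list [] []
  simp only [List.sum_nil] at h
  have hM : pvM ([] : List (List Int)) = 0 := rfl
  rw [hM] at h
  rw [h]
  set p := data_list.foldl
      (fun (st : List (List Int) × List Int) c =>
        if c == 0 then (st.1 ++ [st.2], ([] : List Int)) else (st.1, st.2 ++ [c]))
      ([], []) with hp
  simp only
  -- RHS: max? of (gs ++ [cur]).map sum ++ [0]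
  rcases hgs : p.1.map List.sum with _ | ⟨s, t⟩
  · simp only [pvM, hgs, List.foldl_nil]
    have : (p.1 ++ [p.2]).map List.sum ++ [0] = p.2.sum :: [0] := by simp [hgs]
    rw [this, PySem.List.max?_id_cons]
    simp only [List.foldl_cons, List.foldl_nil, max_def]
    split_ifs <;> omega
  · have : (p.1 ++ [p.2]).map List.sum ++ [0] = s :: (t ++ [p.2.sum, 0]) := by
      simp [hgs]
    rw [this, PySem.List.max?_id_cons]
    simp only [List.foldl_append, List.foldl_cons, List.foldl_nil]
    have hMv : pvM p.1 = t.foldl max (max 0 s) := by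
      simp [pvM, hgs]
    rw [hMv, pvfoldl_max_pull]
    simp only [max_def]
    split_ifs <;> omega
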